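-- pv_equiv track=rewrite | github.com/lucmuss/csc-administration | src/apps/core/club.py | _normalized_services
-- ===== SOURCE A (Python) =====
-- def _normalized_services(value: str) -> list[str]:
--     raw = value.replace("\r", "\n")
--     parts = []
--     for line in raw.split("\n"):
--         for item in line.split(","):
--             cleaned = item.strip()
--             if cleaned:
--                 parts.append(cleaned)
--     return parts
-- ===== SOURCE B (Python) =====
-- def _normalized_services(value: str) -> list[str]:
--     parts: list[str] = []
--     buf: list[str] = []
--
--     def flush() -> None:
--         cleaned = "".join(buf).strip()
--         if cleaned:
--             parts.append(cleaned)
--         buf.clear()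
--
--     for ch in value:
--         if ch in "\r\n,":
--             flush()
--         else:
--             buf.append(ch)
--     flush()
--     return parts
-- ===== Notes on version B (the rewrite author's own statement) =====
-- stated objective: alternative
-- what changed: B replaces A's replace-then-nested-split passes (map \r to \n, split on newlines, split each line on commas) with a single left-to-right scan over the characters that flushes a token buffer at every delimiter.
import Mathlib
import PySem

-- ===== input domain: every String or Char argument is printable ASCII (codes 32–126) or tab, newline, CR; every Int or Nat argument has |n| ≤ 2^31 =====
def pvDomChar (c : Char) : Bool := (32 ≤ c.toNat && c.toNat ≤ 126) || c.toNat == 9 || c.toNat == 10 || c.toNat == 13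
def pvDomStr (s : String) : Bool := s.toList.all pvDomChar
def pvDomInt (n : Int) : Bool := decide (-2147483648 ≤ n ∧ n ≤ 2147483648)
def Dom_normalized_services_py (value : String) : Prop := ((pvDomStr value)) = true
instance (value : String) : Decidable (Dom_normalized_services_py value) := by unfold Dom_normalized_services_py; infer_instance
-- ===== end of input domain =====

-- B replaces A's replace-then-nested-split passes with one left-to-right scan flushing a token buffer at each delimiter (objective: alternative, same asymptotic cost).

-- ===== PORT A =====
-- the '.split' separators are nonempty literals, so PySem.Str.split? always returns 'some'; '.getD []' only unwraps it
def normalized_services_py (value : String) : List String :=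
  let raw := PySem.Str.replace value "\r" "\n"
  ((PySem.Str.split? raw "\n").getD []).foldl (fun parts line =>
    ((PySem.Str.split? line ",").getD []).foldl (fun parts item =>
      let cleaned := PySem.Str.strip item
      if cleaned ≠ "" then parts ++ [cleaned] else parts) parts) []

-- ===== PORT B =====
def pvDelim (c : Char) : Bool := c == '\r' || c == '\n' || c == ','

-- 'flush()' of Source B: strip the buffered token, keep it if non-empty, reset the buffer
def pvFlush (parts : List String) (buf : List Char) : List String :=
  let cleaned := PySem.Chars.strip buf
  if cleaned.isEmpty then parts else parts ++ [String.ofList cleaned]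

-- the 'for ch in value' loop of Source B, carrying (parts, buf)
def pvGo : List Char → List String → List Char → List String
  | [], parts, buf => pvFlush parts buf
  | c :: rest, parts, buf =>
    if pvDelim c then pvGo rest (pvFlush parts buf) []
    else pvGo rest parts (buf ++ [c])

def normalized_services_py_alt (value : String) : List String :=
  pvGo value.toList [] []

-- ===== PRECONDITION & SPEC =====
def Spec_normalized_services_py (value : String) (out : List String) : Prop := out = normalized_services_py_alt value
instance (value : String) (out : List String) : Decidable (Spec_normalized_services_py value out) := by unfold Spec_normalized_services_py; infer_instance

-- ===== CLAIM (what is proved, stated in full; the proofs are below) =====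
def Claim_equal_normalized_services_py : Prop := ∀ (value : String), Dom_normalized_services_py value → Spec_normalized_services_py value (normalized_services_py value)

-- ===== LEMMAS AND PROOFS =====

-- splitting a char list at every char satisfying p (Python's split semantics: empty pieces kept)
def pvSplitP (p : Char → Bool) : List Char → List (List Char)
  | [] => [[]]
  | c :: r =>
    if p c then [] :: pvSplitP p r
    else match pvSplitP p r with
      | [] => [[c]]
      | t :: ts => (c :: t) :: ts

def pvPrepend (pre : List Char) : List (List Char) → List (List Char)
  | [] => [pre]
  | t :: ts => (pre ++ t) :: ts

def pvStripF (tok : List Char) : Option String :=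
  let t := PySem.Chars.strip tok
  if t.isEmpty then none else some (String.ofList t)

lemma pvSplitP_ne_nil (p : Char → Bool) (xs : List Char) : pvSplitP p xs ≠ [] := by
  cases xs with
  | nil => simp [pvSplitP]
  | cons c r =>
    simp only [pvSplitP]
    split
    · simp
    · cases h : pvSplitP p r <;> simp

lemma pvPrepend_nil (L : List (List Char)) (h : L ≠ []) : pvPrepend [] L = L := by
  cases L with
  | nil => exact absurd rfl h
  | cons t ts => simp [pvPrepend]

-- splitOn.go with enough fuel computes pvSplitP, for a single-char separator
lemma pvGoSplit (d : Char) : ∀ (xs : List Char) (fuel : Nat) (cur : List Char) (acc : List (List Char)),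
    xs.length ≤ fuel →
    PySem.Chars.splitOn.go [d] fuel xs cur acc
      = acc.reverse ++ pvPrepend cur.reverse (pvSplitP (· == d) xs) := by
  intro xs
  induction xs with
  | nil =>
    intro fuel cur acc _
    cases fuel <;> simp [PySem.Chars.splitOn.go, pvSplitP, pvPrepend]
  | cons c rest ih =>
    intro fuel cur acc hf
    cases fuel with
    | zero => simp at hf
    | succ f =>
      by_cases hc : c = d
      · subst hc
        have hpre : List.isPrefixOf [c] (c :: rest) = true := by simp [List.isPrefixOf]
        rw [PySem.Chars.splitOn.go, if_pos hpre]
        have hdrop : List.drop [c].length (c :: rest) = rest := rfl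
        simp only [List.length_cons] at hf
        rw [hdrop, ih f [] (cur.reverse :: acc) (by omega)]
        simp only [List.reverse_nil]
        rw [pvPrepend_nil _ (pvSplitP_ne_nil _ rest)]
        have hsp : pvSplitP (· == c) (c :: rest) = [] :: pvSplitP (· == c) rest := by
          simp [pvSplitP]
        rw [hsp]
        simp [pvPrepend]
      · have hpre : List.isPrefixOf [d] (c :: rest) = false := by
          simp [List.isPrefixOf]; exact fun h => absurd h.symm hc
        rw [PySem.Chars.splitOn.go, if_neg (by simp [hpre])]
        simp only [List.length_cons] at hf
        rw [ih f (c :: cur) acc (by omega)]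
        have hne : (c == d) = false := by simp [hc]
        simp only [pvSplitP, hne, Bool.false_eq_true, if_false]
        cases h : pvSplitP (· == d) rest with
        | nil => exact absurd h (pvSplitP_ne_nil _ rest)
        | cons t ts => simp [pvPrepend]

lemma pvSplitOn_single (d : Char) (xs : List Char) :
    PySem.Chars.splitOn xs [d] = pvSplitP (· == d) xs := by
  unfold PySem.Chars.splitOn
  rw [pvGoSplit d xs (xs.length + 1) [] [] (by omega)]
  simp [pvPrepend_nil _ (pvSplitP_ne_nil _ xs)]

-- replace.go with single-char old/new is a map
lemma pvGoReplace (r n : Char) : ∀ (xs : List Char) (fuel : Nat) (acc : List Char),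
    xs.length ≤ fuel →
    PySem.Chars.replace.go [r] [n] fuel xs acc
      = acc.reverse ++ xs.map (fun c => if c = r then n else c) := by
  intro xs
  induction xs with
  | nil =>
    intro fuel acc _
    cases fuel <;> simp [PySem.Chars.replace.go]
  | cons c rest ih =>
    intro fuel acc hf
    cases fuel with
    | zero => simp at hf
    | succ f =>
      simp only [List.length_cons] at hf
      by_cases hc : c = r
      · subst hc
        have hpre : List.isPrefixOf [c] (c :: rest) = true := by simp [List.isPrefixOf]
        rw [PySem.Chars.replace.go, if_pos hpre]
        have hdrop : List.drop [c].length (c :: rest) = rest := rfl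
        rw [hdrop, ih f ([n].reverse ++ acc) (by omega)]
        simp
      · have hpre : List.isPrefixOf [r] (c :: rest) = false := by
          simp [List.isPrefixOf]; exact fun h => absurd h.symm hc
        rw [PySem.Chars.replace.go, if_neg (by simp [hpre])]
        rw [ih f (c :: acc) (by omega)]
        simp [hc]

lemma pvReplace_single (xs : List Char) :
    PySem.Chars.replace xs ['\r'] ['\n'] = xs.map (fun c => if c = '\r' then '\n' else c) := by
  unfold PySem.Chars.replace
  rw [if_neg (by simp)]
  rw [pvGoReplace '\r' '\n' xs xs.length [] (le_refl _)]
  simp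

-- splitting the \r→\n image on \n-or-comma is splitting the original on pvDelim
lemma pvSplitP_map (xs : List Char) :
    pvSplitP (fun c => c == '\n' || c == ',') (xs.map (fun c => if c = '\r' then '\n' else c))
      = pvSplitP pvDelim xs := by
  induction xs with
  | nil => simp [pvSplitP]
  | cons c rest ih =>
    by_cases hd : pvDelim c
    · have hb : ((if c = '\r' then '\n' else c) == '\n' || (if c = '\r' then '\n' else c) == ',') = true := by
        by_cases h1 : c = '\r'; · subst h1; decide
        by_cases h2 : c = '\n'; · subst h2; decide
        by_cases h3 : c = ','; · subst h3; decide
        exfalso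
        have : pvDelim c = false := by simp [pvDelim, h1, h2, h3]
        rw [this] at hd; exact absurd hd (by simp)
      simp [pvSplitP, hb, hd, ih]
    · have hr : c ≠ '\r' := by intro h; subst h; exact hd (by decide)
      have hn : c ≠ '\n' := by intro h; subst h; exact hd (by decide)
      have hcm : c ≠ ',' := by intro h; subst h; exact hd (by decide)
      have hb2 : (c == '\n' || c == ',') = false := by simp [hn, hcm]
      simp only [List.map_cons, pvSplitP, ih, if_neg hr, if_neg hd, hb2,
        Bool.false_eq_true, if_false]

-- flattening the comma-split of every newline-piece is splitting on the union predicate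
lemma pvSplitP_flatMap (q1 q2 : Char → Bool) (xs : List Char) :
    (pvSplitP q1 xs).flatMap (fun l => pvSplitP q2 l)
      = pvSplitP (fun c => q1 c || q2 c) xs := by
  induction xs with
  | nil => simp [pvSplitP]
  | cons c rest ih =>
    by_cases h1 : q1 c
    · simp only [pvSplitP, h1, if_true, Bool.true_or, List.flatMap_cons, ih]
      rfl
    · cases h : pvSplitP q1 rest with
      | nil => exact absurd h (pvSplitP_ne_nil _ rest)
      | cons t ts =>
        rw [h] at ih
        by_cases h2 : q2 c
        · simp only [pvSplitP, h1, Bool.false_eq_true, if_false, h, List.flatMap_cons, h2,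
            Bool.false_or, if_true]
          rw [← ih]
          simp [List.flatMap_cons]
        · simp only [pvSplitP, h1, Bool.false_eq_true, if_false, h, List.flatMap_cons, h2,
            Bool.false_or]
          rw [← ih]
          simp only [List.flatMap_cons]
          cases ht : pvSplitP q2 t with
          | nil => exact absurd ht (pvSplitP_ne_nil _ t)
          | cons u us => simp

-- strip at the Str level on an ofList string
lemma pvStrip_ofList (t : List Char) :
    PySem.Str.strip (String.ofList t) = String.ofList (PySem.Chars.strip t) := by
  apply String.ext
  simp [PySem.Str.toList_strip]

-- A's inner loop over the comma-pieces of one line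
lemma pvInner (l : List (List Char)) (acc : List String) :
    (l.map String.ofList).foldl (fun parts item =>
      if PySem.Str.strip item ≠ "" then parts ++ [PySem.Str.strip item] else parts) acc
      = acc ++ l.filterMap pvStripF := by
  induction l generalizing acc with
  | nil => simp
  | cons t ts ih =>
    simp only [List.map_cons, List.foldl_cons, ih, List.filterMap_cons]
    rw [pvStrip_ofList]
    by_cases h : PySem.Chars.strip t = []
    · simp [pvStripF, h]
    · simp [pvStripF, h, List.isEmpty_iff]

-- A's outer loop over the newline-pieces
lemma pvOuter (L : List (List Char)) (acc : List String) :
    (L.map String.ofList).foldl (fun parts line =>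
      ((PySem.Str.split? line ",").getD []).foldl (fun parts item =>
        if PySem.Str.strip item ≠ "" then parts ++ [PySem.Str.strip item] else parts) parts) acc
      = acc ++ (L.flatMap (fun l => PySem.Chars.splitOn l [','])).filterMap pvStripF := by
  induction L generalizing acc with
  | nil => simp
  | cons l ls ih =>
    simp only [List.map_cons, List.foldl_cons, List.flatMap_cons, List.filterMap_append]
    rw [ih]
    have hsplit : (PySem.Str.split? (String.ofList l) ",").getD []
        = (PySem.Chars.splitOn l [',']).map String.ofList := by
      simp [PySem.Str.split?, PySem.Chars.split?]
    rw [hsplit, pvInner]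
    simp

-- B's loop computes the filterMap of the pending-buffer split
lemma pvGo_eq (cs : List Char) : ∀ (parts : List String) (buf : List Char),
    pvGo cs parts buf = parts ++ (pvPrepend buf (pvSplitP pvDelim cs)).filterMap pvStripF := by
  induction cs with
  | nil =>
    intro parts buf
    simp only [pvGo, pvFlush, pvSplitP, pvPrepend, List.append_nil, List.filterMap]
    by_cases h : (PySem.Chars.strip buf).isEmpty <;> simp [pvStripF, h]
  | cons c rest ih =>
    intro parts buf
    by_cases hd : pvDelim c
    · simp only [pvGo, hd, if_true, ih]
      rw [pvPrepend_nil _ (pvSplitP_ne_nil _ rest)]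
      simp only [pvSplitP, hd, if_true]
      simp only [pvPrepend, List.append_nil, List.filterMap_cons, pvFlush]
      by_cases h : (PySem.Chars.strip buf).isEmpty <;> simp [pvStripF, h]
    · simp only [pvGo, hd, Bool.false_eq_true, if_false, ih]
      simp only [pvSplitP, hd, Bool.false_eq_true, if_false]
      cases h : pvSplitP pvDelim rest with
      | nil => exact absurd h (pvSplitP_ne_nil _ rest)
      | cons t ts => simp [pvPrepend]

-- ===== VERDICT (by name: the statement is the Claim_ definition above) =====
theorem normalized_services_py_spec : Claim_equal_normalized_services_py := by
  intro value _
  unfold Spec_normalized_services_py normalized_services_py_alt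
  have hA : normalized_services_py value
      = ((PySem.Str.split? (PySem.Str.replace value "\r" "\n") "\n").getD []).foldl
          (fun parts line =>
            ((PySem.Str.split? line ",").getD []).foldl (fun parts item =>
              if PySem.Str.strip item ≠ "" then parts ++ [PySem.Str.strip item] else parts)
              parts) [] := rfl
  rw [hA]
  set cs := value.toList with hcs
  have hraw : (PySem.Str.split? (PySem.Str.replace value "\r" "\n") "\n").getD []
      = (PySem.Chars.splitOn (PySem.Chars.replace cs ['\r'] ['\n']) ['\n']).map String.ofList := by
    simp [PySem.Str.split?, PySem.Chars.split?, PySem.Str.toList_replace]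
    rfl
  rw [hraw, pvOuter]
  rw [pvGo_eq]
  rw [pvPrepend_nil _ (pvSplitP_ne_nil _ cs)]
  congr 1
  rw [pvReplace_single, pvSplitOn_single]
  have : (pvSplitP (· == '\n') (cs.map fun c => if c = '\r' then '\n' else c)).flatMap
      (fun l => PySem.Chars.splitOn l [','])
      = (pvSplitP (· == '\n') (cs.map fun c => if c = '\r' then '\n' else c)).flatMap
      (fun l => pvSplitP (· == ',') l) := by
    simp [pvSplitOn_single]
  rw [this, pvSplitP_flatMap]
  exact congrArg _ (pvSplitP_map cs)
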